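-- pv_equiv track=rewrite | github.com/wherby/code | contest/00000c443d154/d174/q1/t1.py | bestTower
-- ===== SOURCE A (Python) =====
-- from typing import List, Tuple, Optional
--
-- def bestTower(towers: List[List[int]], center: List[int], radius: int) -> List[int]:
--     mx = -1
--     ret = []
--     x,y = center
--     for a,b,q in towers:
--         if abs(a-x) + abs(b-y) <=radius:
--             if q >mx:
--                 mx = q
--                 ret=[[a,b]]
--             elif q ==mx:
--                 ret.append([a,b])
--     if len(ret) ==0:
--         return [-1,-1]
--     else:
--         ret.sort()
--         return ret[0]
-- ===== SOURCE B (Python) =====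
-- def bestTower(towers, center, radius):
--     # staged pipeline: filter reachable towers, take the max quality
--     # (floored at the -1 "none" sentinel), then the smallest coordinate at it
--     x, y = center
--     near = [(a, b, q) for a, b, q in towers if abs(a - x) + abs(b - y) <= radius]
--     mx = max([q for _, _, q in near] + [-1])
--     cand = [[a, b] for a, b, q in near if q == mx]
--     return min(cand) if cand else [-1, -1]
-- ===== Notes on version B (the rewrite author's own statement) =====
-- stated objective: simpler
-- what changed: Replaces the single stateful loop that accumulates all tied coordinates and finally sorts them by a staged pipeline: filter the in-radius towers, take the maximum quality (floored at the -1 sentinel), then the lexicographically smallest coordinate among those at that quality via min(), eliminating the mutable tie list and the sort.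
import Mathlib
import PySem

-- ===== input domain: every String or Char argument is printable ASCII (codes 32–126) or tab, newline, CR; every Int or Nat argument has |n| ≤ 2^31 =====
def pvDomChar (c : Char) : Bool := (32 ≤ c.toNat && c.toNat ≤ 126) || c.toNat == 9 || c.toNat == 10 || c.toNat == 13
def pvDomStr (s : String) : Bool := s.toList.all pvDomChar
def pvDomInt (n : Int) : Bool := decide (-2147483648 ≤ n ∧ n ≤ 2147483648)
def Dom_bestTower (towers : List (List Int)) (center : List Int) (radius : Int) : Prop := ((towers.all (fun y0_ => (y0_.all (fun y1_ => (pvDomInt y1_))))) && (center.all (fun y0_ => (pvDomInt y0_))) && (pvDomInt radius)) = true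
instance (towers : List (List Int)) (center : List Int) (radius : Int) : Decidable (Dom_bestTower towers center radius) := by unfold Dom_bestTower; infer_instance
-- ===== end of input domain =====

-- B replaces A's stateful tie-list loop + final sort by a staged pipeline: filter, max quality, min coordinate.


-- ===== PORT A =====
-- loop body of A: state (mx, ret); collect every tie into ret
def stepA (x y radius : Int) (s : Int × List (List Int)) (t : List Int) : Int × List (List Int) :=
  match t with
  | [a, b, q] =>
    if |a - x| + |b - y| ≤ radius then
      if q > s.1 then (q, [[a, b]])
      else if q = s.1 then (s.1, s.2 ++ [[a, b]])
      else s
    else s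
  | _ => s  -- unreachable under Pre_ (Python unpacking would raise)

def bestTower (towers : List (List Int)) (center : List Int) (radius : Int) : List Int :=
  match center with
  | [x, y] =>
    let st := towers.foldl (stepA x y radius) (-1, [])
    if st.2 = [] then [-1, -1]
    else PySem.List.pyGetD (PySem.List.sorted st.2 (fun v => v) false) 0 []
  | _ => []  -- unreachable under Pre_ (Python unpacking would raise)

-- ===== PORT B =====
-- B is a staged pipeline: comprehension filtering in-radius towers, max quality, min coordinate.
def nearB (x y radius : Int) (towers : List (List Int)) : List (Int × Int × Int) :=
  towers.filterMap (fun t =>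
    match t with
    | [a, b, q] => if |a - x| + |b - y| ≤ radius then some (a, b, q) else none
    | _ => none)  -- unreachable under Pre_ (Python unpacking would raise)

def bestTower_alt (towers : List (List Int)) (center : List Int) (radius : Int) : List Int :=
  match center with
  | [x, y] =>
    let near := nearB x y radius towers
    let mx := match PySem.List.max? (near.map (fun t => t.2.2) ++ [-1]) (fun q => q) with
      | some m => m
      | none => 0  -- unreachable: the list contains -1
    let cand := near.filterMap (fun t => if t.2.2 = mx then some [t.1, t.2.1] else none)
    match PySem.List.min? cand (fun v => v) with
    | some m => m
    | none => [-1, -1]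
  | _ => []  -- unreachable under Pre_

-- ===== PRECONDITION & SPEC =====
-- Pre_ excludes exactly the inputs where Python A raises (unpacking 'x,y = center'
-- needs len(center) = 2, 'for a,b,q in towers' needs every tower of length 3).
def Pre_bestTower (towers : List (List Int)) (center : List Int) (radius : Int) : Prop :=
  center.length = 2 ∧ ∀ t ∈ towers, t.length = 3
instance (towers : List (List Int)) (center : List Int) (radius : Int) : Decidable (Pre_bestTower towers center radius) := by unfold Pre_bestTower; infer_instance

def pvWitness_bestTower : List (List Int) × List Int × Int := ([[1, 2, 5], [0, 0, 5]], [0, 0], 4)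

def Spec_bestTower (towers : List (List Int)) (center : List Int) (radius : Int) (out : List Int) : Prop := out = bestTower_alt towers center radius
instance (towers : List (List Int)) (center : List Int) (radius : Int) (out : List Int) : Decidable (Spec_bestTower towers center radius out) := by unfold Spec_bestTower; infer_instance

-- ===== CLAIM (what is proved, stated in full; the proofs are below) =====
def Claim_equal_bestTower : Prop := ∀ (towers : List (List Int)) (center : List Int) (radius : Int), Dom_bestTower towers center radius → Pre_bestTower towers center radius → Spec_bestTower towers center radius (bestTower towers center radius)

-- ===== LEMMAS AND PROOFS =====

-- A's loop over towers equals the same loop over B's filtered list of triples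
def stepT (s : Int × List (List Int)) (t : Int × Int × Int) : Int × List (List Int) :=
  if t.2.2 > s.1 then (t.2.2, [[t.1, t.2.1]])
  else if t.2.2 = s.1 then (s.1, s.2 ++ [[t.1, t.2.1]])
  else s

lemma foldA_eq_foldT (x y radius : Int) (towers : List (List Int)) :
    ∀ s, towers.foldl (stepA x y radius) s = (nearB x y radius towers).foldl stepT s := by
  induction towers with
  | nil => intro s; rfl
  | cons t ts ih =>
    intro s
    rcases t with _ | ⟨a, _ | ⟨b, _ | ⟨q, _ | ⟨w, rest⟩⟩⟩⟩ <;>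
      simp only [nearB, List.filterMap_cons, List.foldl_cons, stepA] <;>
      try exact ih s
    by_cases hr : |a - x| + |b - y| ≤ radius
    · rw [if_pos hr, if_pos hr]
      simp only [List.foldl_cons]
      exact ih _
    · rw [if_neg hr, if_neg hr]
      exact ih s

-- running max of qualities
def maxQ (m : Int) (l : List (Int × Int × Int)) : Int :=
  l.foldl (fun acc t => max acc t.2.2) m

def candsOf (mx : Int) (l : List (Int × Int × Int)) : List (List Int) :=
  l.filterMap (fun t => if t.2.2 = mx then some [t.1, t.2.1] else none)

lemma le_maxQ (m : Int) (l : List (Int × Int × Int)) : m ≤ maxQ m l := by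
  induction l generalizing m with
  | nil => exact le_refl m
  | cons t ts ih =>
    exact le_trans (le_max_left m t.2.2) (ih (max m t.2.2))

-- the invariant: A's loop computes the running max and the candidates at that max
lemma foldT_char (l : List (Int × Int × Int)) :
    ∀ (m : Int) (r : List (List Int)),
      l.foldl stepT (m, r) =
        (maxQ m l, (if maxQ m l = m then r else []) ++ candsOf (maxQ m l) l) := by
  induction l with
  | nil => intro m r; simp [maxQ, candsOf]
  | cons t ts ih =>
    intro m r
    obtain ⟨a, b, q⟩ := t
    have hM : maxQ m ((a, b, q) :: ts) = maxQ (max m q) ts := rfl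
    simp only [List.foldl_cons, stepT]
    by_cases hq : q > m
    · have hmq : max m q = q := max_eq_right (le_of_lt hq)
      have hMge : q ≤ maxQ q ts := le_maxQ _ _
      have hMne : maxQ q ts ≠ m := by intro h; omega
      rw [if_pos hq, ih, hM, hmq, if_neg hMne]
      by_cases hMe : maxQ q ts = q
      · have hqM : q = maxQ q ts := hMe.symm
        simp [candsOf, hMe]
      · have hqM : q ≠ maxQ q ts := fun h => hMe h.symm
        simp [candsOf, hMe, hqM]
    · rw [if_neg hq]
      by_cases he : q = m
      · rw [if_pos he, ih]
        have hmq : max m q = m := by omega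
        rw [hM, hmq]
        by_cases hMe : maxQ m ts = m
        · have hqM : q = maxQ m ts := by omega
          rw [if_pos hMe, if_pos hMe]
          simp [candsOf, ← hqM]
        · have hqM : q ≠ maxQ m ts := by omega
          rw [if_neg hMe, if_neg hMe]
          simp [candsOf, hqM]
      · rw [if_neg he, ih]
        have hmq : max m q = m := by omega
        rw [hM, hmq]
        have hqM : q ≠ maxQ m ts := by
          have := le_maxQ m ts
          omega
        simp [candsOf, hqM]

-- B's max(qs + [-1]) is the running max from -1
lemma foldl_max_assoc (l : List Int) : ∀ a b : Int, l.foldl max (max a b) = max (l.foldl max a) b := by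
  induction l with
  | nil => intro a b; rfl
  | cons x xs ih =>
    intro a b
    simp only [List.foldl_cons]
    rw [show max (max a b) x = max (max a x) b by omega, ih]

lemma max?_append_neg1 (l : List Int) :
    PySem.List.max? (l ++ [-1]) (fun q => q) = some (l.foldl max (-1)) := by
  cases l with
  | nil => decide
  | cons x xs =>
    rw [List.cons_append, PySem.List.max?_id_cons]
    congr 1
    rw [List.foldl_append]
    simp only [List.foldl_cons, List.foldl_nil]
    rw [max_comm (-1) x]
    exact (foldl_max_assoc xs x (-1)).symm

lemma maxQ_eq_map_foldl (l : List (Int × Int × Int)) (m : Int) :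
    maxQ m l = (l.map (fun t => t.2.2)).foldl max m := by
  induction l generalizing m with
  | nil => rfl
  | cons t ts ih => exact ih (max m t.2.2)

theorem bestTower_spec : Claim_equal_bestTower := by
  intro towers center radius _ hpre
  obtain ⟨hc, _⟩ := hpre
  rcases center with _ | ⟨x, _ | ⟨y, _ | ⟨z, c⟩⟩⟩ <;> simp at hc
  unfold Spec_bestTower bestTower bestTower_alt
  simp only
  set near := nearB x y radius towers with hnear
  have hMx : (match PySem.List.max? (near.map (fun t => t.2.2) ++ [-1]) (fun q => q) with
      | some m => m
      | none => (0 : Int)) = maxQ (-1) near := by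
    rw [max?_append_neg1, maxQ_eq_map_foldl]
  have hfold : towers.foldl (stepA x y radius) (-1, []) =
      (maxQ (-1) near, candsOf (maxQ (-1) near) near) := by
    rw [foldA_eq_foldT, ← hnear, foldT_char]
    congr 1
    split_ifs <;> rfl
  rw [hfold, hMx]
  simp only [candsOf]
  set C := near.filterMap (fun t => if t.2.2 = maxQ (-1) near then some [t.1, t.2.1] else none) with hC
  by_cases hCe : C = []
  · rw [if_pos hCe, hCe]
    rfl
  · rw [if_neg hCe]
    rcases hs : PySem.List.sorted C (fun v => v) false with _ | ⟨hd, tl⟩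
    · exact absurd ((PySem.List.sorted_eq_nil_iff _ _ _).mp hs) hCe
    · rw [PySem.List.pyGetD_zero_cons]
      rcases hm : PySem.List.min? C (fun v => v) with _ | m
      · exact absurd ((PySem.List.min?_eq_none_iff _ _).mp hm) hCe
      · have hhd_mem : hd ∈ C := by
          have := PySem.List.mem_sorted (xs := C) (key := fun v => v) (rev := false) (x := hd)
          rw [hs] at this; exact this.mp (by simp)
        have hD : (LinearOrder.toDecidableLT : DecidableLT (List ℤ)) =
            (fun (a b : List ℤ) => a.decidableLT b) := by
          funext a b; exact Subsingleton.elim _ _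
        have hm' : @PySem.List.min? (List ℤ) (List ℤ) List.instLT LinearOrder.toDecidableLT
            C (fun v => v) = some m := by
          rw [hD]; exact hm
        have hsort : @PySem.List.sorted (List ℤ) (List ℤ) List.instLT LinearOrder.toDecidableLT
            C (fun v => v) false = hd :: tl := by
          rw [hD]; exact hs
        have hle : hd ≤ m :=
          PySem.List.key_head_sorted_le (κ := List ℤ) C (fun v => v) hsort m
            (@PySem.List.min?_mem (List ℤ) (List ℤ) List.instLT LinearOrder.toDecidableLT C (fun v => v) m hm')
        have hge : m ≤ hd :=
          PySem.List.min?_isMin (κ := List ℤ) (xs := C) (key := fun v => v) hm' hd hhd_mem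
        exact le_antisymm hle hge
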